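-- pv_equiv track=rewrite | github.com/OSEscape/escape_sdk | escape_sdk/_internal/api.py | _parseSignatureParams
-- ===== SOURCE A (Python) =====
-- from typing import TYPE_CHECKING, Any, Dict, List, Tuple, Type
--
-- def _parseSignatureParams(signature: str) -> List[str]:
--     """
--     Parse JNI signature and extract all parameter types.
--     Consolidated parser used by all methods to avoid duplicate parsing logic.
--
--     Args:
--         signature: JNI method signature (e.g., "(ILjava/lang/String;)V")
--
--     Returns:
--         List of JNI type strings for each parameter
--     """
--     params_str = signature[signature.index("(") + 1 : signature.index(")")]
--     if not params_str:
--         return []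
--
--     param_types = []
--     i = 0
--     while i < len(params_str):
--         if params_str[i] == "L":
--             # Object type - find semicolon
--             end = params_str.index(";", i)
--             param_types.append(params_str[i : end + 1])
--             i = end + 1
--         elif params_str[i] == "[":
--             # Array type - consume all array dimensions
--             j = i
--             while j < len(params_str) and params_str[j] == "[":
--                 j += 1
--             if j < len(params_str) and params_str[j] == "L":
--                 end = params_str.index(";", j)
--                 param_types.append(params_str[i : end + 1])
--                 i = end + 1
--             else:
--                 param_types.append(params_str[i : j + 1])
--                 i = j + 1
--         else:
--             # Primitive type - single character
--             param_types.append(params_str[i])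
--             i += 1
--
--     return param_types
-- ===== SOURCE B (Python) =====
-- def _parseSignatureParams(signature: str):
--     """Parse JNI signature into parameter type strings (recursive tokenizer)."""
--     params_str = signature[signature.index("(") + 1 : signature.index(")")]
--
--     def tokens(s):
--         if not s:
--             return []
--         dims = len(s) - len(s.lstrip("["))
--         rest = s[dims:]
--         if rest.startswith("L"):
--             end = rest.index(";")
--             return [s[:dims] + rest[: end + 1]] + tokens(rest[end + 1 :])
--         return [s[: dims + 1]] + tokens(rest[1:])
--
--     return tokens(params_str)
-- ===== Notes on version B (the rewrite author's own statement) =====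
-- stated objective: simpler
-- what changed: Replaced A's index-driven while loop (with a nested bracket-scanning inner loop and manual i/j/end bookkeeping) by a recursive tokenizer that strips one JNI type token off the front of the remaining parameter string at each step.
import Mathlib
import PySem

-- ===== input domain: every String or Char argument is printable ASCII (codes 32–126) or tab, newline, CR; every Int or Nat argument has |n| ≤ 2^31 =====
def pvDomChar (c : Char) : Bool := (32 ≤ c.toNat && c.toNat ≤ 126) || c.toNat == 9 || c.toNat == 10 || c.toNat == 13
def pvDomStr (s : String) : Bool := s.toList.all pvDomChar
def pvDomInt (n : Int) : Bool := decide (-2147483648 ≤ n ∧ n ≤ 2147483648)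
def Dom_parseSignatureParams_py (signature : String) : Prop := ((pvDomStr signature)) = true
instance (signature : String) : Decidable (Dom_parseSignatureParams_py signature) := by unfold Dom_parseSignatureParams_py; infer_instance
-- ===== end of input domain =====

-- B replaces A's index-driven while loop (with its nested bracket-scanning loop and manual slice
-- bookkeeping) by a recursive tokenizer over the remaining string; objective: simpler.

-- exact port of Python str.index(c, i) for a single character: index of the first
-- occurrence of c at position ≥ i, none where Python raises ValueError
def pvIndexFrom (s : List Char) (c : Char) (i : Nat) : Option Nat :=
  ((s.drop i).findIdx? (· = c)).map (i + ·)

theorem pvIndexFrom_ge {s : List Char} {c : Char} {i e : Nat}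
    (h : pvIndexFrom s c i = some e) : i ≤ e := by
  unfold pvIndexFrom at h
  rcases Option.map_eq_some_iff.mp h with ⟨k, _, hk⟩
  omega

-- ===== PORT A =====
-- inner while loop: `while j < len(params_str) and params_str[j] == "[": j += 1`
def pvSkipBr (s : List Char) (j : Nat) : Nat :=
  if h : j < s.length then
    if s[j] = '[' then pvSkipBr s (j + 1) else j
  else j
termination_by s.length - j

theorem pvSkipBr_ge (s : List Char) (j : Nat) : j ≤ pvSkipBr s j := by
  unfold pvSkipBr
  split
  · split
    · have := pvSkipBr_ge s (j + 1); omega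
    · exact le_refl j
  · exact le_refl j
termination_by s.length - j

-- the main while loop of A: index i into params_str, accumulator param_types
def pvLoopA (s : List Char) (i : Nat) (acc : List String) : List String :=
  if h : i < s.length then
    if s[i] = 'L' then
      match hm : pvIndexFrom s ';' i with
      | some e => pvLoopA s (e + 1) (acc ++ [String.ofList ((s.take (e + 1)).drop i)])
      | none => acc     -- Python raises ValueError here (excluded by Pre_)
    else if s[i] = '[' then
      let j := pvSkipBr s i
      if j < s.length ∧ s.getD j ' ' = 'L' then
        match hm : pvIndexFrom s ';' j with
        | some e => pvLoopA s (e + 1) (acc ++ [String.ofList ((s.take (e + 1)).drop i)])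
        | none => acc   -- Python raises ValueError here (excluded by Pre_)
      else pvLoopA s (j + 1) (acc ++ [String.ofList ((s.take (j + 1)).drop i)])
    else pvLoopA s (i + 1) (acc ++ [String.ofList [s[i]]])
  else acc
termination_by s.length - i
decreasing_by
  · have := pvIndexFrom_ge hm; omega
  · have h1 := pvSkipBr_ge s i; have := pvIndexFrom_ge hm; omega
  · have h1 := pvSkipBr_ge s i; omega
  · omega

def parseSignatureParams_py (signature : String) : List String :=
  let s := signature.toList
  match pvIndexFrom s '(' 0, pvIndexFrom s ')' 0 with
  | some a, some b =>
      let params := (s.take b).drop (a + 1)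
      if params = [] then [] else pvLoopA params 0 []
  | _, _ => []          -- Python raises ValueError here (excluded by Pre_)

-- ===== PORT B =====
-- exact port of Python str.index(c) for a single character (B only searches from the start):
-- none where Python raises ValueError
def pvIndexB (s : List Char) (c : Char) : Option Nat := s.findIdx? (· = c)

-- B's recursive tokenizer: a leading '[' run, then either an object type up to ';' or one character
def pvTokensB (s : List Char) : List String :=
  if hs : s = [] then []
  else
    let dims := (s.takeWhile (· = '[')).length
    let rest := s.drop dims
    if rest.headD ' ' = 'L' then    -- rest.startswith("L")
      match hm : rest.findIdx? (· = ';') with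
      | some e => String.ofList (s.take dims ++ rest.take (e + 1)) :: pvTokensB (rest.drop (e + 1))
      | none => []      -- Python raises ValueError here (excluded by Pre_)
    else String.ofList (s.take (dims + 1)) :: pvTokensB (rest.drop 1)
termination_by s.length
decreasing_by
  · have h1 : s.length ≠ 0 := by simpa [List.length_eq_zero_iff] using hs
    simp only [List.length_drop]; simp; omega
  · have h1 : s.length ≠ 0 := by simpa [List.length_eq_zero_iff] using hs
    simp only [List.length_drop]; simp; omega

def parseSignatureParams_py_alt (signature : String) : List String :=
  let s := signature.toList
  match pvIndexB s '(' with
  | none => []          -- Python raises ValueError here (excluded by Pre_)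
  | some a =>
    match pvIndexB s ')' with
    | none => []        -- Python raises ValueError here (excluded by Pre_)
    | some b => pvTokensB ((s.take b).drop (a + 1))

-- ===== PRECONDITION & SPEC =====
-- every 'L' in the params substring has a ';' at or after it
def pvOkL (t : List Char) : Prop :=
  ∀ i, i < t.length → t.getD i ' ' = 'L' → ';' ∈ t.drop i

-- Pre_ excludes exactly the inputs where Python A raises ValueError: a missing '(' or ')',
-- or an object type 'L…' in the params substring with no terminating ';' (B raises there too).
def Pre_parseSignatureParams_py (signature : String) : Prop :=
  let s := signature.toList
  ('(' ∈ s) ∧ (')' ∈ s) ∧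
    pvOkL ((s.take ((s.findIdx? (· = ')')).getD 0)).drop ((s.findIdx? (· = '(')).getD 0 + 1))

instance (signature : String) : Decidable (Pre_parseSignatureParams_py signature) := by
  unfold Pre_parseSignatureParams_py pvOkL; infer_instance

def pvWitness_parseSignatureParams_py : String := "(ILjava/lang/String;[[J[Z)V"

def Spec_parseSignatureParams_py (signature : String) (out : List String) : Prop := out = parseSignatureParams_py_alt signature
instance (signature : String) (out : List String) : Decidable (Spec_parseSignatureParams_py signature out) := by unfold Spec_parseSignatureParams_py; infer_instance

-- ===== CLAIM (what is proved, stated in full; the proofs are below) =====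
def Claim_equal_parseSignatureParams_py : Prop := ∀ (signature : String), Dom_parseSignatureParams_py signature → Pre_parseSignatureParams_py signature → Spec_parseSignatureParams_py signature (parseSignatureParams_py signature)

-- ===== LEMMAS AND PROOFS =====

theorem pvOkL_drop {t : List Char} (h : pvOkL t) (m : Nat) : pvOkL (t.drop m) := by
  intro i hi hL
  have h1 : (t.drop m).getD i ' ' = t.getD (m + i) ' ' := by
    simp [List.getD_eq_getElem?_getD, List.getElem?_drop]
  have h2 : i < t.length - m := by simpa using hi
  have := h (m + i) (by omega) (by rw [← h1]; exact hL)
  simpa [List.drop_drop, Nat.add_comm] using this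

theorem pvFind_some {s : List Char} {c : Char} (h : c ∈ s) :
    ∃ k, s.findIdx? (· = c) = some k := by
  cases hf : s.findIdx? (· = c) with
  | some k => exact ⟨k, rfl⟩
  | none => exact absurd (List.findIdx?_eq_none_iff.mp hf c h) (by simp)

theorem pvSkipBr_eq (s : List Char) (i : Nat) :
    pvSkipBr s i = i + ((s.drop i).takeWhile (· = '[')).length := by
  unfold pvSkipBr
  split
  · rename_i h
    rw [← List.getElem_cons_drop h]
    split
    · rename_i hB
      rw [pvSkipBr_eq s (i + 1)]
      simp [hB]; omega
    · rename_i hB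
      simp [hB]
  · rename_i h
    rw [List.drop_eq_nil_of_le (by omega)]
    simp
termination_by s.length - i

theorem pvGetD_drop (s : List Char) (i k : Nat) :
    (s.drop i).getD k ' ' = s.getD (i + k) ' ' := by
  simp [List.getD_eq_getElem?_getD, List.getElem?_drop]

theorem pvHeadD_getD (t : List Char) : t.headD ' ' = t.getD 0 ' ' := by
  cases t <;> rfl

-- the central invariant: A's loop from index i produces B's tokens of the remaining suffix
theorem pvLoopA_eq (n : Nat) : ∀ (s : List Char) (i : Nat) (acc : List String),
    s.length - i ≤ n → pvOkL (s.drop i) →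
    pvLoopA s i acc = acc ++ pvTokensB (s.drop i) := by
  induction n with
  | zero =>
    intro s i acc hn hok
    have hge : s.length ≤ i := by omega
    rw [List.drop_eq_nil_of_le hge]
    unfold pvLoopA pvTokensB
    simp [Nat.not_lt.mpr hge]
  | succ n ih =>
    intro s i acc hn hok
    by_cases h : i < s.length
    · have hcons : s[i] :: s.drop (i + 1) = s.drop i := List.getElem_cons_drop h
      have hne : s.drop i ≠ [] := by simp only [ne_eq, List.drop_eq_nil_iff]; omega
      have hget0 : (s.drop i).getD 0 ' ' = s[i] := by rw [← hcons]; rfl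
      by_cases hL : s[i] = 'L'
      · -- object type: dims = 0 on the B side
        obtain ⟨k, hk⟩ := pvFind_some (hok 0 (by simp only [List.length_drop]; omega) (by rw [hget0]; exact hL))
        rw [List.drop_zero] at hk
        have hidx : pvIndexFrom s ';' i = some (i + k) := by
          unfold pvIndexFrom; rw [hk]; rfl
        have hdims : ((s.drop i).takeWhile (· = '[')).length = 0 := by
          rw [← hcons]; simp [hL]
        have hBeq : pvTokensB (s.drop i) =
            String.ofList ((s.drop i).take (k + 1)) :: pvTokensB ((s.drop i).drop (k + 1)) := by
          rw [pvTokensB]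
          simp only [dif_neg hne]
          rw [if_pos (by rw [hdims, List.drop_zero, pvHeadD_getD, hget0]; exact hL)]
          split
          · next e' he' =>
            simp only [hdims, List.drop_zero] at he' ⊢
            rw [hk] at he'
            injection he' with he'
            subst he'
            simp
          · next he' =>
            simp only [hdims, List.drop_zero] at he'
            rw [hk] at he'
            cases he'
        rw [pvLoopA]
        simp only [dif_pos h, if_pos hL]
        split
        · next e he =>
          rw [hidx] at he
          injection he with he
          subst he
          rw [ih s (i + k + 1) _ (by omega)
            (by have := pvOkL_drop hok (k + 1);
                simpa [List.drop_drop, Nat.add_assoc, Nat.add_comm, Nat.add_left_comm] using this)]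
          rw [hBeq, List.drop_take, List.drop_drop]
          have h1 : i + k + 1 - i = k + 1 := by omega
          have h2 : i + (k + 1) = i + k + 1 := by omega
          rw [h1, h2]
          simp
        · next he => rw [hidx] at he; cases he
      · by_cases hB : s[i] = '['
        · -- array type
          have hj : pvSkipBr s i = i + ((s.drop i).takeWhile (· = '[')).length := pvSkipBr_eq s i
          set dims := ((s.drop i).takeWhile (· = '[')).length with hdims
          have hdle : dims ≤ (s.drop i).length := (List.takeWhile_prefix _).length_le
          have hrest : s.drop (i + dims) = (s.drop i).drop dims := by
            rw [List.drop_drop]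
          have hgetD : s.getD (i + dims) ' ' = ((s.drop i).drop dims).getD 0 ' ' := by
            simp
          rw [pvLoopA]
          simp only [dif_pos h, if_neg hL, if_pos hB, hj]
          by_cases hc : i + dims < s.length ∧ s.getD (i + dims) ' ' = 'L'
          · -- '[…[L…;'
            have hLd : ((s.drop i).drop dims).getD 0 ' ' = 'L' := by rw [← hgetD]; exact hc.2
            have hdlt : dims < (s.drop i).length := by have := hc.1; simp only [List.length_drop]; omega
            obtain ⟨k, hk⟩ := pvFind_some (hok dims hdlt (by rw [pvGetD_drop]; exact hc.2))
            have hidx : pvIndexFrom s ';' (i + dims) = some (i + dims + k) := by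
              unfold pvIndexFrom; rw [hrest, hk]; simp
            have hBeq : pvTokensB (s.drop i) =
                String.ofList ((s.drop i).take dims ++ ((s.drop i).drop dims).take (k + 1)) ::
                  pvTokensB (((s.drop i).drop dims).drop (k + 1)) := by
              rw [pvTokensB]
              simp only [dif_neg hne]
              rw [if_pos (by rw [← hdims, pvHeadD_getD]; exact hLd)]
              split
              · next e' he' =>
                simp only [← hdims] at he' ⊢
                rw [hk] at he'
                injection he' with he'
                subst he'
                rfl
              · next he' =>
                simp only [← hdims] at he'
                rw [hk] at he'
                cases he'
            rw [if_pos hc]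
            split
            · next e he =>
              rw [hj] at he
              rw [hidx] at he
              injection he with he
              subst he
              rw [ih s (i + dims + k + 1) _ (by omega)
                (by have := pvOkL_drop hok (dims + k + 1);
                    simpa [List.drop_drop, Nat.add_assoc, Nat.add_comm, Nat.add_left_comm] using this)]
              rw [hBeq, List.drop_take, List.drop_drop, List.drop_drop]
              have h1 : i + dims + k + 1 - i = dims + (k + 1) := by omega
              have h2 : i + dims + (k + 1) = i + dims + k + 1 := by omega
              rw [h1, h2, hrest, ← List.take_add]
              simp
            · next he => rw [hj] at he; rw [hidx] at he; cases he
          · -- '[…[' followed by nothing or a non-'L' character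
            have hnL : ¬ ((s.drop i).drop dims).headD ' ' = 'L' := by
              rw [pvHeadD_getD, ← hgetD]
              intro hx
              apply hc
              refine ⟨?_, hx⟩
              by_contra hge
              have hnone : s.getD (i + dims) ' ' = ' ' := by
                rw [List.getD_eq_getElem?_getD, List.getElem?_eq_none (by omega)]; rfl
              rw [hnone] at hx
              exact absurd hx (by decide)
            have hBeq : pvTokensB (s.drop i) =
                String.ofList ((s.drop i).take (dims + 1)) ::
                  pvTokensB (((s.drop i).drop dims).drop 1) := by
              rw [pvTokensB]
              simp only [dif_neg hne]
              rw [if_neg (by rw [← hdims]; exact hnL)]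
            rw [if_neg hc]
            rw [ih s (i + dims + 1) _ (by omega)
              (by have := pvOkL_drop hok (dims + 1);
                  simpa [List.drop_drop, Nat.add_assoc, Nat.add_comm, Nat.add_left_comm] using this)]
            rw [hBeq, List.drop_take, List.drop_drop, List.drop_drop]
            have h1 : i + dims + 1 - i = dims + 1 := by omega
            have h2 : i + (dims + 1) = i + dims + 1 := by omega
            rw [h1, h2]
            simp
        · -- primitive type: dims = 0
          have hdims : ((s.drop i).takeWhile (· = '[')).length = 0 := by
            rw [← hcons]; simp [hB]
          have hBeq : pvTokensB (s.drop i) =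
            String.ofList ((s.drop i).take 1) :: pvTokensB ((s.drop i).drop 1) := by
            rw [pvTokensB]
            simp only [dif_neg hne]
            rw [if_neg (by rw [hdims, List.drop_zero, pvHeadD_getD, hget0]; exact hL)]
            simp only [hdims, List.drop_zero, Nat.zero_add]
          rw [pvLoopA]
          simp only [dif_pos h, if_neg hL, if_neg hB]
          rw [ih s (i + 1) _ (by omega)
            (by have := pvOkL_drop hok 1; simpa [List.drop_drop, Nat.add_comm] using this)]
          rw [hBeq, List.drop_drop]
          have htake : (s.drop i).take 1 = [s[i]] := by rw [← hcons]; rfl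
          rw [htake]
          simp
    · rw [List.drop_eq_nil_of_le (by omega)]
      unfold pvLoopA pvTokensB
      simp [h]

-- ===== VERDICT (by name: the statement is the Claim_ definition above) =====
theorem parseSignatureParams_py_spec : Claim_equal_parseSignatureParams_py := by
  intro signature _ hpre
  obtain ⟨hpo, hpc, hok⟩ := hpre
  obtain ⟨a, ha⟩ := pvFind_some hpo
  obtain ⟨b, hb⟩ := pvFind_some hpc
  have hia : pvIndexFrom signature.toList '(' 0 = some a := by
    unfold pvIndexFrom; rw [List.drop_zero, ha]; simp
  have hib : pvIndexFrom signature.toList ')' 0 = some b := by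
    unfold pvIndexFrom; rw [List.drop_zero, hb]; simp
  have hiaB : pvIndexB signature.toList '(' = some a := ha
  have hibB : pvIndexB signature.toList ')' = some b := hb
  unfold Spec_parseSignatureParams_py parseSignatureParams_py parseSignatureParams_py_alt
  simp only [hia, hib, hiaB, hibB]
  rw [ha, hb] at hok
  simp only [Option.getD_some] at hok
  set p := ((signature.toList.take b).drop (a + 1)) with hp
  by_cases hnil : p = []
  · rw [if_pos hnil, hnil, pvTokensB]
    simp
  · rw [if_neg hnil]
    have := pvLoopA_eq p.length p 0 [] (by omega) (by simpa using hok)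
    simpa using this
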